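-- pv_equiv track=rewrite | github.com/scastanedabarba/uva-ntm_resistance_pipe | scripts/interpret_calls.py | interpret_amikacin
-- ===== SOURCE A (Python) =====
-- from typing import Dict, Tuple, List, Optional
--
-- RRS_SITES = [1373, 1375, 1376, 1458]
--
-- def interpret_amikacin(iso: str, rrs_calls: Dict[int, str]) -> Tuple[str, str]:
--     for pos in RRS_SITES:
--         if rrs_calls.get(pos) == "MUT":
--             return ("Resistant", f"Resistant; mutation at rrs position {pos}")
--     mixed_pos = next((p for p in RRS_SITES if rrs_calls.get(p) == "MIXED"), None)
--     if mixed_pos is not None: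
--         return ("Resistance possible", f"Resistance possible; mixed genotype at rrs position {mixed_pos}")
--     if any(rrs_calls.get(p) == "INDETERMINATE" for p in RRS_SITES):
--         return ("Indeterminate", "Indeterminate; insufficient depth at one or more rrs target sites")
--     return ("Susceptible", "Susceptible; all rrs target sites WT with adequate depth")
-- ===== SOURCE B (Python) =====
-- RRS_SITES = [1373, 1375, 1376, 1458]
--
-- def interpret_amikacin(iso, rrs_calls):
--     mixed_pos = None
--     indet = False
--     for pos in RRS_SITES:
--         call = rrs_calls.get(pos)
--         if call == "MUT":
--             return ("Resistant", f"Resistant; mutation at rrs position {pos}")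
--         if call == "MIXED" and mixed_pos is None:
--             mixed_pos = pos
--         elif call == "INDETERMINATE":
--             indet = True
--     if mixed_pos is not None:
--         return ("Resistance possible", f"Resistance possible; mixed genotype at rrs position {mixed_pos}")
--     if indet:
--         return ("Indeterminate", "Indeterminate; insufficient depth at one or more rrs target sites")
--     return ("Susceptible", "Susceptible; all rrs target sites WT with adequate depth")
-- ===== Notes on version B (the rewrite author's own statement) =====
-- stated objective: simpler
-- what changed: Replaced A's four separate scans over RRS_SITES (MUT loop, next() generator for MIXED, any() for INDETERMINATE) by a single pass that returns early at the first MUT and accumulates the first MIXED position and an indeterminate flag.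
import Mathlib
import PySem

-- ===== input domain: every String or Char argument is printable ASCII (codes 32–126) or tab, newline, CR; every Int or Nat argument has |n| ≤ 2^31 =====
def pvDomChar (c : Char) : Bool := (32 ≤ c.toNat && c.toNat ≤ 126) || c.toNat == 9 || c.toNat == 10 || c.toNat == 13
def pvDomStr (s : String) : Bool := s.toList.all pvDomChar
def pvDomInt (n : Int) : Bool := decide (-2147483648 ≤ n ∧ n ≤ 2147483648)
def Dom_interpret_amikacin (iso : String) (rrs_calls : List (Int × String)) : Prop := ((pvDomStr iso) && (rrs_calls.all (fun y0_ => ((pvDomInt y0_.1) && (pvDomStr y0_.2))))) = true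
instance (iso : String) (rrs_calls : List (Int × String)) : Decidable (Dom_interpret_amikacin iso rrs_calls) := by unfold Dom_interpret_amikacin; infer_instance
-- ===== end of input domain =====

-- B replaces A's four independent scans of RRS_SITES by a single pass (simpler, one scan).

def rrsSites : List Int := [1373, 1375, 1376, 1458]

-- ===== PORT A =====
-- A's first for-loop with early return = first site whose call is "MUT"
def pvFirstMut : List Int → List (Int × String) → Option Int
  | [], _ => none
  | p :: rest, d => if (PySem.Dict.mk d).get? p = some "MUT" then some p else pvFirstMut rest d

-- A's next((p for p in RRS_SITES if ... == "MIXED"), None)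
def pvFirstMixed : List Int → List (Int × String) → Option Int
  | [], _ => none
  | p :: rest, d => if (PySem.Dict.mk d).get? p = some "MIXED" then some p else pvFirstMixed rest d

-- A's any(... == "INDETERMINATE" for p in RRS_SITES)
def pvAnyIndet : List Int → List (Int × String) → Bool
  | [], _ => false
  | p :: rest, d => ((PySem.Dict.mk d).get? p = some "INDETERMINATE") || pvAnyIndet rest d

def interpret_amikacin (iso : String) (rrs_calls : List (Int × String)) : String × String :=
  match pvFirstMut rrsSites rrs_calls with
  | some pos => ("Resistant", "Resistant; mutation at rrs position " ++ PySem.Int.toStr pos)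
  | none =>
    match pvFirstMixed rrsSites rrs_calls with
    | some mp => ("Resistance possible", "Resistance possible; mixed genotype at rrs position " ++ PySem.Int.toStr mp)
    | none =>
      if pvAnyIndet rrsSites rrs_calls then
        ("Indeterminate", "Indeterminate; insufficient depth at one or more rrs target sites")
      else
        ("Susceptible", "Susceptible; all rrs target sites WT with adequate depth")

-- ===== PORT B =====
-- single pass: early return on MUT, accumulate first MIXED position and an indeterminate flag
def pvScan : List Int → List (Int × String) → Option Int → Bool → String × String
  | [], _, mixedPos, indet =>
    match mixedPos with
    | some mp => ("Resistance possible", "Resistance possible; mixed genotype at rrs position " ++ PySem.Int.toStr mp)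
    | none =>
      if indet then
        ("Indeterminate", "Indeterminate; insufficient depth at one or more rrs target sites")
      else
        ("Susceptible", "Susceptible; all rrs target sites WT with adequate depth")
  | p :: rest, d, mixedPos, indet =>
    let call := (PySem.Dict.mk d).get? p
    if call = some "MUT" then
      ("Resistant", "Resistant; mutation at rrs position " ++ PySem.Int.toStr p)
    else if call = some "MIXED" ∧ mixedPos = none then
      pvScan rest d (some p) indet
    else if call = some "INDETERMINATE" then
      pvScan rest d mixedPos true
    else
      pvScan rest d mixedPos indet

def interpret_amikacin_alt (iso : String) (rrs_calls : List (Int × String)) : String × String :=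
  pvScan rrsSites rrs_calls none false

-- ===== PRECONDITION & SPEC =====
def Spec_interpret_amikacin (iso : String) (rrs_calls : List (Int × String)) (out : String × String) : Prop := out = interpret_amikacin_alt iso rrs_calls
instance (iso : String) (rrs_calls : List (Int × String)) (out : String × String) : Decidable (Spec_interpret_amikacin iso rrs_calls out) := by unfold Spec_interpret_amikacin; infer_instance

-- ===== CLAIM (what is proved, stated in full; the proofs are below) =====
def Claim_equal_interpret_amikacin : Prop := ∀ (iso : String) (rrs_calls : List (Int × String)), Dom_interpret_amikacin iso rrs_calls → Spec_interpret_amikacin iso rrs_calls (interpret_amikacin iso rrs_calls)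

-- ===== LEMMAS AND PROOFS =====

-- ===== VERDICT (by name: the statement is the Claim_ definition above) =====
-- pvScan with accumulated state equals A's three-scan composition
theorem pvScan_eq (sites : List Int) (d : List (Int × String)) :
    ∀ (mixedPos : Option Int) (indet : Bool),
    pvScan sites d mixedPos indet =
      (match pvFirstMut sites d with
      | some pos => (("Resistant" : String), "Resistant; mutation at rrs position " ++ PySem.Int.toStr pos)
      | none =>
        match (match mixedPos with | some m => some m | none => pvFirstMixed sites d) with
        | some mp => ("Resistance possible", "Resistance possible; mixed genotype at rrs position " ++ PySem.Int.toStr mp)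
        | none =>
          if indet || pvAnyIndet sites d then
            ("Indeterminate", "Indeterminate; insufficient depth at one or more rrs target sites")
          else
            ("Susceptible", "Susceptible; all rrs target sites WT with adequate depth")) := by
  induction sites with
  | nil =>
    intro mixedPos indet
    cases mixedPos <;> simp [pvScan, pvFirstMut, pvFirstMixed, pvAnyIndet]
  | cons p rest ih =>
    intro mixedPos indet
    by_cases h1 : (PySem.Dict.mk d).get? p = some "MUT"
    · simp [pvScan, pvFirstMut, h1]
    · by_cases h2 : (PySem.Dict.mk d).get? p = some "MIXED"
      · cases mixedPos with
        | none => simp [pvScan, pvFirstMut, pvFirstMixed, h2, ih]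
        | some m => simp [pvScan, pvFirstMut, h2, ih]
      · by_cases h3 : (PySem.Dict.mk d).get? p = some "INDETERMINATE"
        · simp [pvScan, pvFirstMut, pvFirstMixed, pvAnyIndet, h3, ih]
        · simp [pvScan, pvFirstMut, pvFirstMixed, pvAnyIndet, h1, h2, h3, ih]

theorem interpret_amikacin_spec : Claim_equal_interpret_amikacin := by
  intro iso d _
  unfold Spec_interpret_amikacin interpret_amikacin interpret_amikacin_alt
  rw [pvScan_eq]
  simp
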